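-- pv_equiv track=rewrite | github.com/SteadyKim/Algorism | language_PYTHON/Programmers/Programmers_방금그곡.py | solution
-- ===== SOURCE A (Python) =====
-- def change(m):
--     m = m.replace("C#", "H")
--     m = m.replace("D#", "I")
--     m = m.replace("F#", "J")
--     m = m.replace("G#", "K")
--     m = m.replace("A#", "L")
--     m = m.replace("B#", "M")
--
--     return m
--
-- def solution(m, musicinfo_list: list):
--     # 전처리
--
--     m = change(m)
--     answer = []
--
--     for index, music_info in enumerate(musicinfo_list):
--
--         time = 0
--         music_info = music_info.split(",")
--         start_time, end_time, name, info = music_info[0], music_info[1], music_info[2], music_info[3]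
--
--         info = change(info)
--
--         start_time = start_time.split(":")
--         end_time = end_time.split(":")
--
--         time = (int(end_time[0]) * 60 + int(end_time[1])) - (int(start_time[0]) * 60 + int(start_time[1]))
--
--         if time < len(info):
--             info = info[:time]
--
--         if time > len(info):
--             info = info * (time // len(info)) + info[: time % len(info)]
--
--
--         if m in info:
--             answer.append([time, index, name])
--
--
--     if len(answer) == 0:
--         return "(None)"
--
--     answer.sort(key = lambda x: [-x[0], x[1]])
--
--     return answer[0][2]
-- ===== SOURCE B (Python) =====
-- def change(m):
--     m = m.replace("C#", "H")
--     m = m.replace("D#", "I")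
--     m = m.replace("F#", "J")
--     m = m.replace("G#", "K")
--     m = m.replace("A#", "L")
--     m = m.replace("B#", "M")
--     return m
--
-- def to_minutes(t):
--     p = t.split(":")
--     return int(p[0]) * 60 + int(p[1])
--
-- def played_melody(melody, time):
--     # melody actually heard during `time` minutes: a prefix, or the melody
--     # repeated by indexing modulo its length
--     if time <= len(melody):
--         return melody[:time]
--     return "".join(melody[i % len(melody)] for i in range(time))
--
-- def solution(m, musicinfo_list: list):
--     m = change(m)
--     best = None  # (time, name) of the current winner
--     for entry in musicinfo_list:
--         parts = entry.split(",")
--         time = to_minutes(parts[1]) - to_minutes(parts[0])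
--         if m in played_melody(change(parts[3]), time):
--             if best is None or time > best[0]:
--                 best = (time, parts[2])
--     return best[1] if best is not None else "(None)"
-- ===== Notes on version B (the rewrite author's own statement) =====
-- stated objective: alternative
-- what changed: B replaces A's collect-all-matches list plus final sort by [-time, index] with an online best-tracking pass (strict time > best keeps the earliest maximal match), and builds the heard melody by a single modulo-indexed join over range(time) instead of A's two-branch truncate / repeat-and-slice construction.
import Mathlib
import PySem

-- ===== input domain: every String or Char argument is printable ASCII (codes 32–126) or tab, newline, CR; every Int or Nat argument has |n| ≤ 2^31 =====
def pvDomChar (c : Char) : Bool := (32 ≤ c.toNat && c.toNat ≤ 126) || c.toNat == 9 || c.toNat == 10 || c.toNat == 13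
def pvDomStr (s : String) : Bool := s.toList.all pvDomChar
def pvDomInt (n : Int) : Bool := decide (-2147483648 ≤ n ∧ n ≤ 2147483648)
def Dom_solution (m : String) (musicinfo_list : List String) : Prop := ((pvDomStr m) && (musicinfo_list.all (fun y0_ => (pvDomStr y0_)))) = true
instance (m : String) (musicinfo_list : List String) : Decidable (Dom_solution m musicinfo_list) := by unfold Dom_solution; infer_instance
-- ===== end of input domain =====

-- B tracks the best (time, name) online instead of A's collect-then-sort by [-time, index],
-- and builds the heard melody by modulo-indexed joining instead of A's truncate / repeat+slice.

-- ===== PORT A =====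
def pvChange (m : String) : String :=
  let m := PySem.Str.replace m "C#" "H"
  let m := PySem.Str.replace m "D#" "I"
  let m := PySem.Str.replace m "F#" "J"
  let m := PySem.Str.replace m "G#" "K"
  let m := PySem.Str.replace m "A#" "L"
  let m := PySem.Str.replace m "B#" "M"
  m

def pvProc (mm : String) (music_info : String) : Int × String × Bool :=
  let parts := (PySem.Str.split? music_info ",").getD []
  let start_time := (PySem.List.pyGet? parts 0).getD ""
  let end_time := (PySem.List.pyGet? parts 1).getD ""
  let name := (PySem.List.pyGet? parts 2).getD ""
  let info0 := pvChange ((PySem.List.pyGet? parts 3).getD "")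
  let st := (PySem.Str.split? start_time ":").getD []
  let et := (PySem.Str.split? end_time ":").getD []
  let time :=
    (((PySem.Int.ofStr? ((PySem.List.pyGet? et 0).getD "")).getD 0) * 60 +
     ((PySem.Int.ofStr? ((PySem.List.pyGet? et 1).getD "")).getD 0)) -
    (((PySem.Int.ofStr? ((PySem.List.pyGet? st 0).getD "")).getD 0) * 60 +
     ((PySem.Int.ofStr? ((PySem.List.pyGet? st 1).getD "")).getD 0))
  let info1 := if time < PySem.Str.len info0 then PySem.Str.slice info0 none (some time) else info0
  let info2 :=
    if time > PySem.Str.len info1 then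
      String.ofList ((List.replicate (PySem.Int.floordiv time (PySem.Str.len info1)).toNat info1.toList).flatten ++
        (PySem.Str.slice info1 none (some (PySem.Int.mod time (PySem.Str.len info1)))).toList)
    else info1
  (time, name, PySem.Str.isIn mm info2)

def solution (m : String) (musicinfo_list : List String) : String :=
  let mm := pvChange m
  let answer := (PySem.List.enumerate musicinfo_list).foldl
    (fun answer p =>
      let r := pvProc mm p.2
      if r.2.2 then answer ++ [(r.1, p.1, r.2.1)] else answer)
    ([] : List (Int × Int × String))
  if answer.length = 0 then "(None)"
  else ((PySem.List.sorted answer (fun x => toLex (-x.1, x.2.1))).headD (0, 0, "")).2.2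

-- ===== PORT B =====
-- Source B's to_minutes
def pvToMin (t : String) : Int :=
  let p := (PySem.Str.split? t ":").getD []
  ((PySem.Int.ofStr? ((PySem.List.pyGet? p 0).getD "")).getD 0) * 60 +
  ((PySem.Int.ofStr? ((PySem.List.pyGet? p 1).getD "")).getD 0)

-- Source B's played_melody: a prefix, or "".join(melody[i % len(melody)] for i in range(time))
def pvPlayed (melody : String) (time : Int) : String :=
  if time ≤ PySem.Str.len melody then PySem.Str.slice melody none (some time)
  else String.ofList ((PySem.List.pyRange 0 time 1).map
    (fun i => (PySem.Str.pyGet? melody (PySem.Int.mod i (PySem.Str.len melody))).getD ' '))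

def solution_alt (m : String) (musicinfo_list : List String) : String :=
  let mq := pvChange m
  let best := musicinfo_list.foldl
    (fun (best : Option (Int × String)) entry =>
      let parts := (PySem.Str.split? entry ",").getD []
      let time := pvToMin ((PySem.List.pyGet? parts 1).getD "") -
                  pvToMin ((PySem.List.pyGet? parts 0).getD "")
      if PySem.Str.isIn mq (pvPlayed (pvChange ((PySem.List.pyGet? parts 3).getD "")) time) then
        match best with
        | none => some (time, (PySem.List.pyGet? parts 2).getD "")
        | some bb => if time > bb.1 then some (time, (PySem.List.pyGet? parts 2).getD "") else some bb
      else best)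
    none
  match best with
  | none => "(None)"
  | some bb => bb.2

-- ===== PRECONDITION & SPEC =====
-- Pre_ excludes exactly the inputs where the Python A raises: an entry with fewer than 4
-- comma fields or fewer than 2 colon fields in a time (IndexError), a time field int()
-- rejects (ValueError), or an empty melody with positive duration (ZeroDivisionError).
def pvEntryOk (s : String) : Bool :=
  let parts := (PySem.Str.split? s ",").getD []
  decide (4 ≤ parts.length) &&
  (let st := (PySem.Str.split? ((PySem.List.pyGet? parts 0).getD "") ":").getD []
   let et := (PySem.Str.split? ((PySem.List.pyGet? parts 1).getD "") ":").getD []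
   decide (2 ≤ st.length) && decide (2 ≤ et.length) &&
   (PySem.Int.ofStr? ((PySem.List.pyGet? st 0).getD "")).isSome &&
   (PySem.Int.ofStr? ((PySem.List.pyGet? st 1).getD "")).isSome &&
   (PySem.Int.ofStr? ((PySem.List.pyGet? et 0).getD "")).isSome &&
   (PySem.Int.ofStr? ((PySem.List.pyGet? et 1).getD "")).isSome &&
   (let time := ((PySem.Int.ofStr? ((PySem.List.pyGet? et 0).getD "")).getD 0 * 60 +
                 (PySem.Int.ofStr? ((PySem.List.pyGet? et 1).getD "")).getD 0)
              - ((PySem.Int.ofStr? ((PySem.List.pyGet? st 0).getD "")).getD 0 * 60 +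
                 (PySem.Int.ofStr? ((PySem.List.pyGet? st 1).getD "")).getD 0)
    !(decide (0 < time) && ((PySem.List.pyGet? parts 3).getD "" == ""))))

def Pre_solution (m : String) (musicinfo_list : List String) : Prop :=
  musicinfo_list.all pvEntryOk = true
instance (m : String) (musicinfo_list : List String) : Decidable (Pre_solution m musicinfo_list) := by
  unfold Pre_solution; infer_instance

def pvWitness_solution : String × List String := ("ABC", ["00:00,00:03,song,ABC"])

def Spec_solution (m : String) (musicinfo_list : List String) (out : String) : Prop := out = solution_alt m musicinfo_list
instance (m : String) (musicinfo_list : List String) (out : String) : Decidable (Spec_solution m musicinfo_list out) := by unfold Spec_solution; infer_instance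

-- ===== CLAIM (what is proved, stated in full; the proofs are below) =====
def Claim_equal_solution : Prop := ∀ (m : String) (musicinfo_list : List String), Dom_solution m musicinfo_list → Pre_solution m musicinfo_list → Spec_solution m musicinfo_list (solution m musicinfo_list)

-- ===== LEMMAS AND PROOFS =====

lemma pvGo_ne_nil (old new : List Char) (hnew : new ≠ []) :
    ∀ (fuel : Nat) (l acc : List Char), PySem.Chars.replace.go old new fuel l acc = [] → l = [] ∧ acc = [] := by
  intro fuel
  induction fuel with
  | zero =>
    intro l acc h
    simp [PySem.Chars.replace.go] at h
    exact ⟨h.2, h.1⟩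
  | succ f ih =>
    intro l acc h
    cases l with
    | nil =>
      simp [PySem.Chars.replace.go] at h
      exact ⟨rfl, h⟩
    | cons c t =>
      rw [PySem.Chars.replace.go] at h
      split at h
      · rcases ih _ _ h with ⟨_, h2⟩
        exact absurd (List.append_eq_nil_iff.mp h2).1 (by simpa using hnew)
      · rcases ih _ _ h with ⟨_, h2⟩
        exact absurd h2 (by simp)

lemma pvReplace_ne_nil (s old new : List Char) (hold : old ≠ []) (hnew : new ≠ []) (hs : s ≠ []) :
    PySem.Chars.replace s old new ≠ [] := by
  intro h
  rw [PySem.Chars.replace] at h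
  rw [if_neg (by simpa using hold)] at h
  exact hs (pvGo_ne_nil old new hnew _ _ _ h).1

lemma pvChange_ne_nil (s : String) (hs : s.toList ≠ []) : (pvChange s).toList ≠ [] := by
  simp only [pvChange, PySem.Str.toList_replace]
  exact pvReplace_ne_nil _ _ _ (by simp) (by simp)
    (pvReplace_ne_nil _ _ _ (by simp) (by simp)
      (pvReplace_ne_nil _ _ _ (by simp) (by simp)
        (pvReplace_ne_nil _ _ _ (by simp) (by simp)
          (pvReplace_ne_nil _ _ _ (by simp) (by simp)
            (pvReplace_ne_nil _ _ _ (by simp) (by simp) hs)))))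

lemma pvRep (s : List Char) (n : Nat) (hs : s.length = n) (hn : 0 < n) :
    ∀ T : Nat, (List.range T).map (fun k => (s[k % n]?).getD ' ')
      = (List.replicate (T / n) s).flatten ++ s.take (T % n) := by
  intro T
  induction T using Nat.strong_induction_on with
  | _ T ih =>
    by_cases hT : T < n
    · rw [Nat.div_eq_of_lt hT, Nat.mod_eq_of_lt hT]
      simp only [List.replicate_zero, List.flatten_nil, List.nil_append]
      apply List.ext_getElem
      · simp [hs]; omega
      · intro i h1 h2
        simp only [List.getElem_map, List.getElem_range, List.getElem_take]
        have hi : i < T := by simpa using h1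
        rw [Nat.mod_eq_of_lt (by omega)]
        simp [List.getElem?_eq_getElem (by omega : i < s.length)]
    · push_neg at hT
      obtain ⟨M, hM⟩ : ∃ M, T = n + M := ⟨T - n, by omega⟩
      subst hM
      rw [List.range_add, List.map_append, List.map_map]
      have h1 : (List.range n).map (fun k => (s[k % n]?).getD ' ') = s := by
        apply List.ext_getElem
        · simp [hs]
        · intro i hh1 hh2
          simp only [List.getElem_map, List.getElem_range]
          rw [Nat.mod_eq_of_lt (by simpa using hh1)]
          simp [List.getElem?_eq_getElem (by omega : i < s.length)]
      have h2 : ((fun k => (s[k % n]?).getD ' ') ∘ (fun j => n + j)) = fun k => (s[k % n]?).getD ' ' := by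
        funext k
        simp [Nat.add_mod_left]
      rw [h1, h2, ih M (by omega)]
      have hdiv : (n + M) / n = M / n + 1 := by
        rw [Nat.add_comm, Nat.add_div_right _ hn]
      have hmod : (n + M) % n = M % n := by simp [Nat.add_mod_left]
      rw [hdiv, hmod]
      simp [List.replicate_succ]

lemma pvPlayed_toList (info : String) (time : Int) (h : 0 < time → info.toList ≠ []) :
    (pvPlayed info time).toList =
      (let info1 := if time < PySem.Str.len info then PySem.Str.slice info none (some time) else info
       if time > PySem.Str.len info1 then
         String.ofList ((List.replicate (PySem.Int.floordiv time (PySem.Str.len info1)).toNat info1.toList).flatten ++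
           (PySem.Str.slice info1 none (some (PySem.Int.mod time (PySem.Str.len info1)))).toList)
       else info1).toList := by
  have hlen : PySem.Str.len info = (info.toList.length : Int) := by simp
  by_cases hle : time ≤ PySem.Str.len info
  · rw [pvPlayed, if_pos hle]
    by_cases hlt : time < PySem.Str.len info
    · simp only [hlt, if_pos]
      have hfalse : ¬ time > PySem.Str.len (PySem.Str.slice info none (some time)) := by
        have hL : PySem.Str.len (PySem.Str.slice info none (some time)) =
            ((PySem.Str.slice info none (some time)).toList.length : Int) := by
          simp [← String.length_toList]
        by_cases h0 : 0 ≤ time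
        · have hLval : (PySem.Str.slice info none (some time)).toList.length = time.toNat := by
            rw [show (PySem.Str.slice info none (some time)).toList = info.toList.take time.toNat from by
              simp [PySem.List.slice_to _ h0]]
            rw [List.length_take]
            rw [hlen] at hlt
            omega
          rw [hL, hLval]; omega
        · rw [hL]; omega
      rw [if_neg hfalse]
    · simp only [hlt, if_neg, not_false_iff]
      have heq : time = (info.toList.length : Int) := by rw [hlen] at hle hlt; omega
      have hfalse : ¬ time > PySem.Str.len info := by rw [hlen]; omega
      rw [if_neg hfalse, heq]
      simp [PySem.List.slice_to_natCast]
  · push_neg at hle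
    rw [pvPlayed, if_neg (by omega)]
    have hpos : 0 < time := by rw [hlen] at hle; omega
    have hne := h hpos
    set n := info.toList.length with hn
    have hn0 : 0 < n := by cases hcl : info.toList <;> simp [hcl] at hne ⊢ <;> simp [hn, hcl]
    have hnotlt : ¬ time < PySem.Str.len info := by rw [hlen]; omega
    simp only [hnotlt, if_neg, not_false_iff]
    rw [if_pos (by rw [hlen]; omega)]
    have hT : time = ((time.toNat : Nat) : Int) := by omega
    set T := time.toNat with hTdef
    have hTn : n < T := by rw [hlen] at hle; omega
    rw [hT, hlen]
    simp only [String.toList_ofList, PySem.List.pyRange_zero_natCast, List.map_map]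
    have hB : ((fun i => (PySem.Str.pyGet? info (PySem.Int.mod i (n : Int))).getD ' ') ∘ (fun k : Nat => (k : Int)))
        = fun k : Nat => ((info.toList[k % n]?).getD ' ') := by
      funext k
      simp only [Function.comp_apply, PySem.Int.mod_natCast, PySem.Str.pyGet?_natCast]
    rw [hB, pvRep info.toList n rfl hn0 T]
    simp only [PySem.Int.floordiv_natCast, PySem.Int.mod_natCast, Int.toNat_natCast,
      PySem.Str.toList_slice, PySem.Chars.slice_eq_listSlice, PySem.List.slice_to_natCast]

lemma pvIsIn_played (mq info : String) (time : Int) (h : 0 < time → info.toList ≠ []) :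
    PySem.Str.isIn mq (pvPlayed info time) =
      PySem.Str.isIn mq
        (let info1 := if time < PySem.Str.len info then PySem.Str.slice info none (some time) else info
         if time > PySem.Str.len info1 then
           String.ofList ((List.replicate (PySem.Int.floordiv time (PySem.Str.len info1)).toNat info1.toList).flatten ++
             (PySem.Str.slice info1 none (some (PySem.Int.mod time (PySem.Str.len info1)))).toList)
         else info1) := by
  rw [PySem.Str.isIn_eq, PySem.Str.isIn_eq, pvPlayed_toList info time h]

lemma pvOk_guard (e : String) (hok : pvEntryOk e = true) :
    0 < (pvToMin ((PySem.List.pyGet? ((PySem.Str.split? e ",").getD []) 1).getD "") -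
         pvToMin ((PySem.List.pyGet? ((PySem.Str.split? e ",").getD []) 0).getD "")) →
    (pvChange ((PySem.List.pyGet? ((PySem.Str.split? e ",").getD []) 3).getD "")).toList ≠ [] := by
  intro hpos
  apply pvChange_ne_nil
  simp only [pvEntryOk, Bool.and_eq_true, decide_eq_true_eq, Bool.not_eq_true',
    Bool.and_eq_false_iff, decide_eq_false_iff_not] at hok
  simp only [pvToMin] at hpos
  rcases hok.2.2 with hc | hc
  · exact absurd hpos hc
  · intro hnil
    have h3 : ((PySem.List.pyGet? ((PySem.Str.split? e ",").getD []) 3).getD "") = "" := by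
      have := congrArg String.ofList hnil
      simpa using this
    rw [h3] at hc
    simp at hc

lemma pvProc_eq (mq e : String) (hok : pvEntryOk e = true) :
    pvProc mq e =
      (let parts := (PySem.Str.split? e ",").getD []
       let time := pvToMin ((PySem.List.pyGet? parts 1).getD "") -
                   pvToMin ((PySem.List.pyGet? parts 0).getD "")
       (time, (PySem.List.pyGet? parts 2).getD "",
        PySem.Str.isIn mq (pvPlayed (pvChange ((PySem.List.pyGet? parts 3).getD "")) time))) := by
  have hg := pvOk_guard e hok
  simp only [pvToMin] at hg
  simp only [pvProc, pvToMin, Prod.mk.injEq]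
  refine ⟨trivial, trivial, ?_⟩
  rw [pvIsIn_played mq _ _ hg]

-- the sort key of A: Python's [-time, index] as a lexicographic pair
def pvKey (x : Int × Int × String) : Lex (Int × Int) := toLex (-x.1, x.2.1)

-- A's answer list, written as filter-then-map over the enumeration
def pvAns (mm : String) (l : List String) (s : Int) : List (Int × Int × String) :=
  ((PySem.List.enumerate l s).filter (fun q => (pvProc mm q.2).2.2)).map
    (fun q => ((pvProc mm q.2).1, q.1, (pvProc mm q.2).2.1))

-- B's online best step, lifted to A's triples
def pvBestT (b : Option (Int × String)) (e : Int × Int × String) : Option (Int × String) :=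
  match b with
  | none => some (e.1, e.2.2)
  | some bb => if e.1 > bb.1 then some (e.1, e.2.2) else some bb

lemma pvAns_nil (mm : String) (s : Int) : pvAns mm [] s = [] := by
  simp [pvAns, PySem.List.enumerate]

lemma pvAns_cons (mm : String) (x : String) (l : List String) (s : Int) :
    pvAns mm (x :: l) s =
      (if (pvProc mm x).2.2 then [((pvProc mm x).1, s, (pvProc mm x).2.1)] else []) ++ pvAns mm l (s + 1) := by
  simp only [pvAns, PySem.List.enumerate_cons, List.filter_cons]
  split_ifs with h <;> simp

-- the pvProc-shaped fold over the strings equals the pvBestT fold over A's answer list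
lemma pvFold_eq (mm : String) :
    ∀ (l : List String) (s : Int) (b : Option (Int × String)),
    l.foldl
      (fun (best : Option (Int × String)) music_info =>
        let r := pvProc mm music_info
        if r.2.2 then
          match best with
          | none => some (r.1, r.2.1)
          | some bb => if r.1 > bb.1 then some (r.1, r.2.1) else some bb
        else best) b
    = (pvAns mm l s).foldl pvBestT b := by
  intro l
  induction l with
  | nil => intro s b; simp [pvAns_nil]
  | cons x t ih =>
    intro s b
    simp only [List.foldl_cons, pvAns_cons]
    by_cases h : (pvProc mm x).2.2 = true
    · simp only [h, if_true, List.singleton_append, List.foldl_cons]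
      rw [ih (s + 1)]
      rfl
    · simp only [Bool.not_eq_true] at h
      simp only [h, Bool.false_eq_true, if_false, List.nil_append]
      exact ih (s + 1) b

-- indices in an enumeration are bounded below by the start, hence strictly increasing
lemma pvEnumerate_fst_le (u : List String) : ∀ (r : Int) (y : Int × String),
    y ∈ PySem.List.enumerate u r → r ≤ y.1 := by
  induction u with
  | nil => intro r y hy; simp [PySem.List.enumerate] at hy
  | cons z w ihw =>
    intro r y hy
    rw [PySem.List.enumerate_cons] at hy
    rcases List.mem_cons.mp hy with hy | hy
    · simp [hy]
    · have := ihw (r + 1) y hy; omega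

lemma pvEnumerate_fst_lt (l : List String) : ∀ (s : Int),
    (PySem.List.enumerate l s).Pairwise (fun a b => a.1 < b.1) := by
  induction l with
  | nil => intro s; simp [PySem.List.enumerate]
  | cons x t ih =>
    intro s
    rw [PySem.List.enumerate_cons]
    refine List.Pairwise.cons ?_ (ih (s + 1))
    intro y hy
    have := pvEnumerate_fst_le t (s + 1) y hy
    simp only
    omega

lemma pvAns_pairwise (mm : String) (l : List String) (s : Int) :
    (pvAns mm l s).Pairwise (fun a b => a.2.1 < b.2.1) := by
  unfold pvAns
  exact ((pvEnumerate_fst_lt l s).filter _).map _ (by intro a b h; simpa using h)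

-- in an index-increasing list, the index determines the element
lemma pvIdx_inj {ans : List (Int × Int × String)}
    (hp : ans.Pairwise (fun a b => a.2.1 < b.2.1)) :
    ∀ a ∈ ans, ∀ c ∈ ans, a.2.1 = c.2.1 → a = c := by
  induction ans with
  | nil => intro a ha; simp at ha
  | cons x t ih =>
    rcases List.pairwise_cons.mp hp with ⟨hx, ht⟩
    intro a ha c hc heq
    rcases List.mem_cons.mp ha with ha | ha <;> rcases List.mem_cons.mp hc with hc | hc
    · rw [ha, hc]
    · exfalso; have := hx c hc; rw [ha] at heq; omega
    · exfalso; have := hx a ha; rw [hc] at heq; omega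
    · exact ih ht a ha c hc heq

-- the online best over an index-increasing list is a key-minimal element
lemma pvBest_spec :
    ∀ (t : List (Int × Int × String)) (b : Int × Int × String),
    (b :: t).Pairwise (fun a c => a.2.1 < c.2.1) →
    ∃ e ∈ b :: t, t.foldl pvBestT (some (b.1, b.2.2)) = some (e.1, e.2.2) ∧
      ∀ x ∈ b :: t, pvKey e ≤ pvKey x := by
  intro t
  induction t with
  | nil =>
    intro b _
    exact ⟨b, by simp, rfl, by intro x hx; simp at hx; rw [hx]⟩
  | cons a t' ih =>
    intro b hp
    rcases List.pairwise_cons.mp hp with ⟨hb, hp'⟩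
    rcases List.pairwise_cons.mp hp' with ⟨ha, ht'⟩
    have hba : b.2.1 < a.2.1 := hb a (by simp)
    by_cases hgt : a.1 > b.1
    · have hp2 : (a :: t').Pairwise (fun x c => x.2.1 < c.2.1) := List.pairwise_cons.mpr ⟨ha, ht'⟩
      rcases ih a hp2 with ⟨e, he, hfold, hmin⟩
      refine ⟨e, ?_, ?_, ?_⟩
      · rcases List.mem_cons.mp he with he | he
        · exact List.mem_cons_of_mem _ (List.mem_cons.mpr (Or.inl he))
        · exact List.mem_cons_of_mem _ (List.mem_cons_of_mem _ he)
      · simpa [pvBestT, hgt] using hfold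
      · intro x hx
        rcases List.mem_cons.mp hx with hx | hx
        · have h1 := hmin a (by simp)
          have h2 : pvKey a < pvKey b := by
            apply Prod.Lex.toLex_lt_toLex.mpr
            left; simp only; omega
          rw [hx]; exact le_of_lt (lt_of_le_of_lt h1 h2)
        · exact hmin x hx
    · have hp2 : (b :: t').Pairwise (fun x c => x.2.1 < c.2.1) :=
        List.pairwise_cons.mpr ⟨fun y hy => hb y (.tail _ hy), ht'⟩
      rcases ih b hp2 with ⟨e, he, hfold, hmin⟩
      refine ⟨e, ?_, ?_, ?_⟩
      · rcases List.mem_cons.mp he with he | he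
        · exact List.mem_cons.mpr (Or.inl he)
        · exact List.mem_cons_of_mem _ (List.mem_cons_of_mem _ he)
      · simpa [pvBestT, hgt] using hfold
      · intro x hx
        rcases List.mem_cons.mp hx with hx | hx
        · exact hmin x (by simp [hx])
        rcases List.mem_cons.mp hx with hx | hx
        · have h1 := hmin b (by simp)
          have h2 : pvKey b ≤ pvKey a := by
            apply Prod.Lex.toLex_le_toLex.mpr
            by_cases h : b.1 = a.1
            · right; constructor
              · simp only; omega
              · simp only; omega
            · left; simp only; omega
          rw [hx]; exact le_trans h1 h2
        · exact hmin x (by simp [hx])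

-- ===== VERDICT (by name: the statement is the Claim_ definition above) =====
theorem solution_spec : Claim_equal_solution := by
  intro m l _hdom hpre
  unfold Spec_solution
  simp only [solution, solution_alt]
  set mm := pvChange m with hmm
  have hA : (PySem.List.enumerate l).foldl
      (fun answer p =>
        let r := pvProc mm p.2
        if r.2.2 then answer ++ [(r.1, p.1, r.2.1)] else answer)
      ([] : List (Int × Int × String)) = pvAns mm l 0 := by
    rw [show (fun (answer : List (Int × Int × String)) (p : Int × String) =>
          let r := pvProc mm p.2
          if r.2.2 then answer ++ [(r.1, p.1, r.2.1)] else answer)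
        = (fun answer p => if (fun q : Int × String => (pvProc mm q.2).2.2) p = true then
            answer ++ [(fun q : Int × String => ((pvProc mm q.2).1, q.1, (pvProc mm q.2).2.1)) p] else answer)
        from rfl]
    rw [PySem.List.foldl_append_if]
    simp [pvAns]
  -- B's fold body rewritten entry-wise (using Pre_) to the pvProc-shaped one
  have hcongr : l.foldl
      (fun (best : Option (Int × String)) entry =>
        let parts := (PySem.Str.split? entry ",").getD []
        let time := pvToMin ((PySem.List.pyGet? parts 1).getD "") -
                    pvToMin ((PySem.List.pyGet? parts 0).getD "")
        if PySem.Str.isIn mm (pvPlayed (pvChange ((PySem.List.pyGet? parts 3).getD "")) time) then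
          match best with
          | none => some (time, (PySem.List.pyGet? parts 2).getD "")
          | some bb => if time > bb.1 then some (time, (PySem.List.pyGet? parts 2).getD "") else some bb
        else best) none
      = l.foldl
      (fun (best : Option (Int × String)) music_info =>
        let r := pvProc mm music_info
        if r.2.2 then
          match best with
          | none => some (r.1, r.2.1)
          | some bb => if r.1 > bb.1 then some (r.1, r.2.1) else some bb
        else best) none := by
    apply PySem.List.foldl_congr_mem
    intro acc x hx
    have hok : pvEntryOk x = true := by
      have := (List.all_eq_true.mp hpre) x hx
      simpa using this
    simp only [pvProc_eq mm x hok]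
  rw [hcongr]
  have hB := pvFold_eq mm l 0 none
  rw [hA, hB]
  rcases hans : pvAns mm l 0 with _ | ⟨c, t⟩
  · simp
  · have hpair : (c :: t).Pairwise (fun a b => a.2.1 < b.2.1) := hans ▸ pvAns_pairwise mm l 0
    obtain ⟨e, he, hfold, hmin⟩ := pvBest_spec t c hpair
    have hfold' : (c :: t).foldl pvBestT none = some (e.1, e.2.2) := by
      simpa [pvBestT] using hfold
    rw [hfold']
    have hlen : ¬ ((c :: t).length = 0) := by simp
    rw [if_neg hlen]
    have hperm := PySem.List.sorted_perm (c :: t) (fun x : Int × Int × String => toLex (-x.1, x.2.1)) false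
    have hpairs := PySem.List.sorted_pairwise (c :: t) (fun x : Int × Int × String => toLex (-x.1, x.2.1))
    rcases hsl : PySem.List.sorted (c :: t) (fun x : Int × Int × String => toLex (-x.1, x.2.1)) with _ | ⟨h, tl⟩
    · exact absurd (hsl ▸ hperm) (by simp)
    · rw [hsl] at hperm hpairs
      have hhmem : h ∈ c :: t := hperm.mem_iff.mp (by simp)
      have hhmin : ∀ x ∈ c :: t, pvKey h ≤ pvKey x := by
        intro x hx
        have hx2 : x ∈ h :: tl := hperm.mem_iff.mpr hx
        rcases List.mem_cons.mp hx2 with hx2 | hx2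
        · rw [hx2]
        · exact (List.pairwise_cons.mp hpairs).1 x hx2
      have hkey : pvKey e = pvKey h :=
        le_antisymm (hmin h hhmem) (hhmin e he)
      have hidx : e.2.1 = h.2.1 := by
        unfold pvKey at hkey
        have := (Prod.mk.injEq _ _ _ _).mp (toLex_inj.mp hkey)
        exact this.2
      have heh : e = h := pvIdx_inj hpair e he h hhmem hidx
      simp [heh]
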